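-- pv_equiv track=rewrite | github.com/zhixin9001/2022-Python | codes/6.data/functions.py | get_diff_count
-- ===== SOURCE A (Python) =====
-- import math
--
-- def get_diff_count(diffs, step=10):
--     max_value = (max(diffs))
--     x_nums = math.ceil(max_value/step)
--     diff_count = {}
--     for index in range(0, x_nums):
--         diff_count[f'{index*step}-{(index+1)*step}'] = 0
--
--     for index in range(0, x_nums):
--         start = index*step
--         end = (index+1)*step
--         diff_count[f'{start}-{end}'] = (len(list(filter(lambda x: x >=
--                                                         start and x < end, diffs))))
--     return diff_count
-- ===== SOURCE B (Python) =====
-- import math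
--
-- def get_diff_count(diffs, step=10):
--     max_value = max(diffs)
--     x_nums = math.ceil(max_value / step)
--     idxs = [x // step for x in diffs if x >= 0]
--     counts = {}
--     for idx in idxs:
--         counts[idx] = counts.get(idx, 0) + 1
--     return {f'{i * step}-{(i + 1) * step}': counts.get(i, 0) for i in range(x_nums)}
-- ===== Notes on version B (the rewrite author's own statement) =====
-- stated objective: faster
-- what changed: Instead of re-filtering the whole diffs list once per bin, B floor-divides each nonnegative value once into an index list, tallies the indices in a dict, and then emits the bin keys with a single counter lookup each.
import Mathlib
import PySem

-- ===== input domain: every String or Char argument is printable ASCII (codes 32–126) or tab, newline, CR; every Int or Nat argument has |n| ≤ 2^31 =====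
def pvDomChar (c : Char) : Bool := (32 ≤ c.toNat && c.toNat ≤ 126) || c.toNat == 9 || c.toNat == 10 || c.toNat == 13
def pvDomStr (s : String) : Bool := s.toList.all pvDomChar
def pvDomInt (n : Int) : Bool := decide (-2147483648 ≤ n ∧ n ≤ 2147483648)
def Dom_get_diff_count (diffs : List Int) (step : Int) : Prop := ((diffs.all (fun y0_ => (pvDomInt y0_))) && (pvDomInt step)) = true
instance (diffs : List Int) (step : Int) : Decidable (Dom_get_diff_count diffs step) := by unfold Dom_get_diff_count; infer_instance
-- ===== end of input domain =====

-- B replaces A's per-bin re-filtering of the whole list (O(bins*n)) with one floor-division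
-- pass that collects each nonnegative value's bin index, a tally of those indices, and a
-- single counter lookup per emitted bin (O(bins+n)); the returned dict is identical.

-- f'{a}-{b}' for integers a and b (both Pythons build bin keys with this very expression)
def pvBinKey (a b : Int) : String :=
  String.ofList (PySem.Int.toChars a ++ '-' :: PySem.Int.toChars b)

-- ===== PORT A =====
def get_diff_count (diffs : List Int) (step : Int) : List (String × Int) :=
  match PySem.List.max? diffs (fun x => x) with
  | none => []        -- empty diffs: max raises ValueError, excluded by Pre_
  | some max_value =>
    if step = 0 then []   -- max_value/step raises ZeroDivisionError: excluded by Pre_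
    else
      -- math.ceil(max_value/step) as exact ceiling division -((-max_value)//step);
      -- exact on Dom: for |max_value|, |step| ≤ 2^31 the float quotient cannot round across an integer
      let x_nums : Int := -(PySem.Int.floordiv (-max_value) step)
      let d0 : PySem.Dict String Int :=
        (PySem.List.pyRange 0 x_nums).foldl
          (fun d index => d.insert (pvBinKey (index * step) ((index + 1) * step)) 0)
          PySem.Dict.empty
      let d1 : PySem.Dict String Int :=
        (PySem.List.pyRange 0 x_nums).foldl
          (fun d index =>
            d.insert (pvBinKey (index * step) ((index + 1) * step))
              ((diffs.filter (fun x => decide (index * step ≤ x) && decide (x < (index + 1) * step))).length : Int))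
          d0
      d1.items

-- ===== PORT B =====
def get_diff_count_alt (diffs : List Int) (step : Int) : List (String × Int) :=
  match PySem.List.max? diffs (fun x => x) with
  | none => []        -- empty diffs: max raises ValueError, excluded by Pre_
  | some max_value =>
    if step = 0 then []   -- ZeroDivisionError: excluded by Pre_
    else
      let x_nums : Int := -(PySem.Int.floordiv (-max_value) step)  -- math.ceil, as in port A
      -- idxs = [x // step for x in diffs if x >= 0]
      let idxs : List Int :=
        (diffs.filter (fun x => decide (0 ≤ x))).map (fun x => PySem.Int.floordiv x step)
      -- counts[idx] = counts.get(idx, 0) + 1 over idxs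
      let counts : PySem.Dict Int Int :=
        idxs.foldl (fun c idx => c.insert idx (c.getD idx 0 + 1)) PySem.Dict.empty
      -- dict comprehension over range(x_nums), value = counts.get(i, 0)
      ((PySem.List.pyRange 0 x_nums).foldl
        (fun d i => d.insert (pvBinKey (i * step) ((i + 1) * step)) (counts.getD i 0))
        PySem.Dict.empty).items

-- ===== PRECONDITION & SPEC =====
-- Pre_ excludes exactly the inputs where A raises: empty diffs (ValueError from max) and step = 0 (ZeroDivisionError).
def Pre_get_diff_count (diffs : List Int) (step : Int) : Prop := diffs ≠ [] ∧ step ≠ 0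
instance (diffs : List Int) (step : Int) : Decidable (Pre_get_diff_count diffs step) := by unfold Pre_get_diff_count; infer_instance
def pvWitness_get_diff_count : List Int × Int := ([3, 12, 25, 12], 10)
def Spec_get_diff_count (diffs : List Int) (step : Int) (out : List (String × Int)) : Prop := out = get_diff_count_alt diffs step
instance (diffs : List Int) (step : Int) (out : List (String × Int)) : Decidable (Spec_get_diff_count diffs step out) := by unfold Spec_get_diff_count; infer_instance

-- ===== CLAIM (what is proved, stated in full; the proofs are below) =====
def Claim_equal_get_diff_count : Prop := ∀ (diffs : List Int) (step : Int), Dom_get_diff_count diffs step → Pre_get_diff_count diffs step → Spec_get_diff_count diffs step (get_diff_count diffs step)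

-- ===== LEMMAS AND PROOFS =====

/- Key injectivity: the bin labels f'{a}-{b}' determine a and b. -/

theorem pvCore_append (b : Nat) (fuel : Nat) : ∀ (n : Nat) (acc : List Char),
    Nat.toDigitsCore b fuel n acc = Nat.toDigitsCore b fuel n [] ++ acc := by
  induction fuel with
  | zero => intro n acc; simp [Nat.toDigitsCore]
  | succ f ih =>
    intro n acc
    simp only [Nat.toDigitsCore]
    by_cases h : n / b = 0
    · simp [h]
    · simp only [h, if_false]
      rw [ih (n / b) ((n % b).digitChar :: acc), ih (n / b) [(n % b).digitChar]]
      simp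

theorem pvToDigits_eq (n : Nat) :
    Nat.toDigits 10 n = if n = 0 then ['0'] else ((Nat.digits 10 n).map Nat.digitChar).reverse := by
  rcases Nat.eq_zero_or_pos n with h | h
  · subst h; rfl
  · simp only [Nat.ne_of_gt h, if_false]
    suffices H : ∀ fuel n, n < fuel → 0 < n →
        Nat.toDigitsCore 10 fuel n [] = ((Nat.digits 10 n).map Nat.digitChar).reverse by
      exact H (n+1) n (Nat.lt_succ_self n) h
    intro fuel
    induction fuel with
    | zero => intro n hn _; omega
    | succ f ih =>
      intro n hn hpos
      simp only [Nat.toDigitsCore]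
      rw [Nat.digits_def' (by norm_num : (1:Nat) < 10) hpos]
      by_cases h10 : n / 10 = 0
      · have hlt : n < 10 := Nat.lt_of_div_eq_zero (by norm_num) h10
        simp [h10, Nat.mod_eq_of_lt hlt]
      · simp only [h10, if_false]
        rw [pvCore_append, ih (n / 10) (by omega : n / 10 < f) (Nat.pos_of_ne_zero h10)]
        simp

theorem pvDigitChar_ne_dash {d : Nat} (h : d < 10) : Nat.digitChar d ≠ '-' := by
  interval_cases d <;> decide

theorem pvDigitChar_inj {d e : Nat} (hd : d < 10) (he : e < 10)
    (h : Nat.digitChar d = Nat.digitChar e) : d = e := by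
  interval_cases d <;> interval_cases e <;> first | rfl | (exfalso; exact absurd h (by decide))

theorem pvToDigits_ne_nil (n : Nat) : Nat.toDigits 10 n ≠ [] := by
  rw [pvToDigits_eq]
  split
  · simp
  · simp [Nat.digits_ne_nil_iff_ne_zero, *]

theorem pvToDigits_noDash (n : Nat) : ∀ c ∈ Nat.toDigits 10 n, c ≠ '-' := by
  rw [pvToDigits_eq]
  split
  · intro c hc; simp at hc; subst hc; decide
  · intro c hc
    simp only [List.mem_reverse, List.mem_map] at hc
    obtain ⟨d, hd, rfl⟩ := hc
    exact pvDigitChar_ne_dash (Nat.digits_lt_base (by norm_num) hd)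

theorem pvMapDigitChar_inj : ∀ (l1 l2 : List Nat), (∀ d ∈ l1, d < 10) → (∀ d ∈ l2, d < 10) →
    l1.map Nat.digitChar = l2.map Nat.digitChar → l1 = l2 := by
  intro l1
  induction l1 with
  | nil => intro l2 _ _ h; cases l2 <;> simp_all
  | cons d t ih =>
    intro l2 h1 h2 h
    cases l2 with
    | nil => simp_all
    | cons e t2 =>
      simp only [List.map_cons, List.cons.injEq] at h
      have := pvDigitChar_inj (h1 d (by simp)) (h2 e (by simp)) h.1
      subst this
      rw [ih t2 (fun x hx => h1 x (by simp [hx])) (fun x hx => h2 x (by simp [hx])) h.2]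

theorem pvToDigits_ne_singleton_zero (n : Nat) (hn : n ≠ 0) : Nat.toDigits 10 n ≠ ['0'] := by
  rw [pvToDigits_eq]
  simp only [hn, if_false]
  intro h
  have h' : (Nat.digits 10 n).map Nat.digitChar = ['0'] := by
    have := congrArg List.reverse h
    simpa using this
  rcases he : Nat.digits 10 n with _ | ⟨d, t⟩
  · exact hn (Nat.digits_eq_nil_iff_eq_zero.mp he)
  · rw [he] at h'
    simp only [List.map_cons, List.cons.injEq] at h'
    have ht : t = [] := by
      have := congrArg List.length h'.2
      simpa using List.eq_nil_of_length_eq_zero (by simpa using this)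
    have hd10 : d < 10 := Nat.digits_lt_base (by norm_num) (by rw [he]; simp)
    have hd0 : d = 0 := pvDigitChar_inj hd10 (by norm_num) h'.1
    subst hd0; subst ht
    have hlast := Nat.getLast_digit_ne_zero 10 hn
    simp [he] at hlast

theorem pvToDigits_inj {m n : Nat} (h : Nat.toDigits 10 m = Nat.toDigits 10 n) : m = n := by
  by_cases hm : m = 0 <;> by_cases hn : n = 0
  · omega
  · exfalso; subst hm; exact pvToDigits_ne_singleton_zero n hn h.symm
  · exfalso; subst hn; exact pvToDigits_ne_singleton_zero m hm h
  · rw [pvToDigits_eq, pvToDigits_eq] at h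
    simp only [hm, hn, if_false] at h
    have h2 : (Nat.digits 10 m).map Nat.digitChar = (Nat.digits 10 n).map Nat.digitChar := by
      have := congrArg List.reverse h
      simpa using this
    have := pvMapDigitChar_inj (Nat.digits 10 m) (Nat.digits 10 n)
      (fun d hd => Nat.digits_lt_base (by norm_num) hd)
      (fun d hd => Nat.digits_lt_base (by norm_num) hd) h2
    have := congrArg (Nat.ofDigits 10) this
    rwa [Nat.ofDigits_digits, Nat.ofDigits_digits] at this

theorem pvDashFree_split : ∀ (l1 l2 u1 u2 : List Char), (∀ c ∈ l1, c ≠ '-') → (∀ c ∈ l2, c ≠ '-') →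
    l1 ++ '-' :: u1 = l2 ++ '-' :: u2 → l1 = l2 ∧ u1 = u2 := by
  intro l1
  induction l1 with
  | nil =>
    intro l2 u1 u2 _ h2 h
    cases l2 with
    | nil => simpa using h
    | cons c t =>
      exfalso
      simp only [List.nil_append, List.cons_append, List.cons.injEq] at h
      exact h2 c (by simp) h.1.symm
  | cons c t ih =>
    intro l2 u1 u2 h1 h2 h
    cases l2 with
    | nil =>
      exfalso
      simp only [List.nil_append, List.cons_append, List.cons.injEq] at h
      exact h1 c (by simp) h.1
    | cons c2 t2 =>
      simp only [List.cons_append, List.cons.injEq] at h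
      obtain ⟨rfl, h'⟩ := h
      obtain ⟨ht, hu⟩ := ih t2 u1 u2 (fun x hx => h1 x (by simp [hx])) (fun x hx => h2 x (by simp [hx])) h'
      exact ⟨by rw [ht], hu⟩

theorem pvToChars_inj {m n : Int} (h : PySem.Int.toChars m = PySem.Int.toChars n) : m = n := by
  unfold PySem.Int.toChars at h
  by_cases hm : m < 0 <;> by_cases hn : n < 0 <;> simp only [hm, hn, if_true, if_false] at h
  · have := pvToDigits_inj (List.cons_injective h |> fun _ => by injection h)
    omega
  · exfalso
    rcases hd : Nat.toDigits 10 n.toNat with _ | ⟨c, t⟩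
    · exact pvToDigits_ne_nil _ hd
    · rw [hd] at h
      injection h with h1 _
      exact pvToDigits_noDash n.toNat c (by rw [hd]; simp) h1.symm
  · exfalso
    rcases hd : Nat.toDigits 10 m.toNat with _ | ⟨c, t⟩
    · exact pvToDigits_ne_nil _ hd
    · rw [hd] at h
      injection h with h1 _
      exact pvToDigits_noDash m.toNat c (by rw [hd]; simp) h1
  · have := pvToDigits_inj h
    omega

theorem pvToChars_noDash_tail (n : Int) :
    ∃ l : List Char, (∀ c ∈ l, c ≠ '-') ∧ l ≠ [] ∧
      PySem.Int.toChars n = (if n < 0 then ['-'] else []) ++ l := by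
  unfold PySem.Int.toChars
  by_cases hn : n < 0 <;> simp only [hn, if_true, if_false]
  · exact ⟨Nat.toDigits 10 n.natAbs, pvToDigits_noDash _, pvToDigits_ne_nil _, rfl⟩
  · exact ⟨Nat.toDigits 10 n.toNat, pvToDigits_noDash _, pvToDigits_ne_nil _, by simp⟩

theorem pvCharsKey_inj {a b a' b' : Int}
    (h : PySem.Int.toChars a ++ '-' :: PySem.Int.toChars b
       = PySem.Int.toChars a' ++ '-' :: PySem.Int.toChars b') : a = a' ∧ b = b' := by
  obtain ⟨l, hl, hlne, he⟩ := pvToChars_noDash_tail a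
  obtain ⟨l', hl', hlne', he'⟩ := pvToChars_noDash_tail a'
  rw [he, he'] at h
  by_cases ha : a < 0 <;> by_cases ha' : a' < 0 <;> simp only [ha, ha', if_true, if_false] at h
  · simp only [List.cons_append, List.nil_append, List.cons.injEq] at h
    obtain ⟨hll, hb⟩ := pvDashFree_split l l' _ _ hl hl' h.2
    refine ⟨pvToChars_inj ?_, pvToChars_inj hb⟩
    rw [he, he', hll]
    simp [ha, ha']
  · exfalso
    rcases l' with _ | ⟨c, t⟩
    · exact hlne' rfl
    · simp only [List.cons_append, List.nil_append, List.cons.injEq] at h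
      exact hl' c (by simp) h.1.symm
  · exfalso
    rcases l with _ | ⟨c, t⟩
    · exact hlne rfl
    · simp only [List.cons_append, List.nil_append, List.cons.injEq] at h
      exact hl c (by simp) h.1
  · simp only [List.nil_append] at h
    obtain ⟨hll, hb⟩ := pvDashFree_split l l' _ _ hl hl' h
    refine ⟨pvToChars_inj ?_, pvToChars_inj hb⟩
    rw [he, he', hll]
    simp [ha, ha']

theorem pvBinKey_inj {a b a' b' : Int} (h : pvBinKey a b = pvBinKey a' b') : a = a' ∧ b = b' :=
  pvCharsKey_inj (String.ofList_inj.mp h)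

/- A's second loop: overwriting every existing key, in key order, rewrites the values in place. -/
theorem pvItems_foldl_insert_existing (k : Int → String) (v : Int → Int) :
    ∀ (l : List Int) (P : List (String × Int)) (g : Int → Int) (d : PySem.Dict String Int),
      d.items = P ++ l.map (fun i => (k i, g i)) →
      (P.map Prod.fst ++ l.map k).Nodup →
      (l.foldl (fun d i => d.insert (k i) (v i)) d).items = P ++ l.map (fun i => (k i, v i)) := by
  intro l
  induction l with
  | nil => intro P g d hd _; simpa using hd
  | cons a t ih =>
    intro P g d hd hnd
    simp only [List.foldl_cons]
    have hmem : (k a, g a) ∈ d.items := by rw [hd]; simp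
    have hcont : d.contains (k a) = true := by
      rw [PySem.Dict.contains_iff_mem_keys]
      show k a ∈ d.items.map Prod.fst
      exact List.mem_map_of_mem hmem
    obtain ⟨hP, hl, hdisj⟩ := List.nodup_append.mp hnd
    have hins := PySem.Dict.items_insert_of_contains d (v a) hcont
    have hitems : (d.insert (k a) (v a)).items
        = (P ++ [(k a, v a)]) ++ t.map (fun i => (k i, g i)) := by
      have h1 : P.map (fun p => if (p.1 == k a) = true then (k a, v a) else p) = P := by
        rw [List.map_congr_left (g := id) ?_, List.map_id]
        intro p hp
        have : p.1 ≠ k a := hdisj p.1 (List.mem_map_of_mem hp) (k a) (by simp)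
        simp [Bool.beq_eq_decide_eq, this]
      have h2 : (t.map (fun i => (k i, g i))).map
          (fun p => if (p.1 == k a) = true then (k a, v a) else p) = t.map (fun i => (k i, g i)) := by
        rw [List.map_map, List.map_congr_left]
        intro i hi
        have hne : k i ≠ k a := by
          intro he
          have : k a ∈ t.map k := by
            rw [← he]; exact List.mem_map_of_mem hi
          simp [List.nodup_cons] at hl
          exact hl.1 i hi he
        simp [Function.comp, Bool.beq_eq_decide_eq, hne]
      rw [hins, hd]
      simp only [List.map_append, List.map_cons]
      rw [h1, h2]
      simp
    have hnd' : ((P ++ [(k a, v a)]).map Prod.fst ++ t.map k).Nodup := by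
      simpa [List.append_assoc] using hnd
    have := ih (P ++ [(k a, v a)]) g (d.insert (k a) (v a)) hitems hnd'
    simpa [List.append_assoc] using this

/- Pointwise: A's half-open bin test equals B's bin-index equation, for any bin index 0 ≤ i < x_nums. -/
theorem pvBinPred (step maxv x i : Int) (hs : step ≠ 0) (hx : x ≤ maxv)
    (hi0 : 0 ≤ i) (hiN : i < -(PySem.Int.floordiv (-maxv) step)) :
    ((decide (i * step ≤ x) && decide (x < (i + 1) * step)) = true) ↔
      (0 ≤ x ∧ PySem.Int.floordiv x step = i) := by
  simp only [Bool.and_eq_true, decide_eq_true_eq]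
  rcases lt_trichotomy step 0 with hneg | h0 | hpos
  · -- step < 0 : both sides are false
    constructor
    · rintro ⟨h1, h2⟩
      exfalso
      nlinarith [h1, h2]
    · rintro ⟨hx0, hfd⟩
      exfalso
      have e1 := PySem.Int.floordiv_mul_add_mod x step
      have e2 := PySem.Int.mod_neg_bounds x hneg
      have hq : PySem.Int.floordiv x step * step ≤ 0 := by
        rw [hfd]; exact mul_nonpos_of_nonneg_of_nonpos hi0 hneg.le
      have hx00 : x = 0 := by omega
      have e3 := PySem.Int.floordiv_mul_add_mod (-maxv) step
      have e4 := PySem.Int.mod_neg_bounds (-maxv) hneg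
      have hq' : PySem.Int.floordiv (-maxv) step ≤ -1 := by omega
      have : PySem.Int.floordiv (-maxv) step * step ≥ -step := by nlinarith
      omega
  · exact absurd h0 hs
  · -- step > 0
    constructor
    · rintro ⟨h1, h2⟩
      have hfd : PySem.Int.floordiv x step = i :=
        (PySem.Int.floordiv_eq_iff_of_pos hpos).mpr ⟨h1, h2⟩
      exact ⟨le_trans (mul_nonneg hi0 hpos.le) h1, hfd⟩
    · rintro ⟨hx0, hfd⟩
      exact (PySem.Int.floordiv_eq_iff_of_pos hpos).mp hfd

-- ===== VERDICT (by name: the statement is the Claim_ definition above) =====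
theorem get_diff_count_spec : Claim_equal_get_diff_count := by
  intro diffs step hdom hpre
  unfold Spec_get_diff_count
  obtain ⟨hne, hs⟩ := hpre
  obtain ⟨maxv, hm⟩ : ∃ m, PySem.List.max? diffs (fun x => x) = some m := by
    cases h : PySem.List.max? diffs (fun x => x) with
    | none => exact absurd ((PySem.List.max?_eq_none_iff _ _).mp h) hne
    | some m => exact ⟨m, rfl⟩
  unfold get_diff_count get_diff_count_alt
  rw [hm]
  simp only [if_neg hs]
  have hk : ∀ {i j : Int}, pvBinKey (i * step) ((i + 1) * step) = pvBinKey (j * step) ((j + 1) * step) → i = j := by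
    intro i j h
    exact mul_right_cancel₀ hs (pvBinKey_inj h).1
  have hR : (PySem.List.pyRange 0 (-PySem.Int.floordiv (-maxv) step)).Nodup :=
    PySem.List.nodup_pyRange_one 0 _
  have hknd : ((PySem.List.pyRange 0 (-PySem.Int.floordiv (-maxv) step)).map
      (fun i => pvBinKey (i * step) ((i + 1) * step))).Nodup :=
    hR.map (fun i j h => hk h)
  -- A's zero-init pass
  have hzero : ((PySem.List.pyRange 0 (-PySem.Int.floordiv (-maxv) step)).foldl
        (fun d i => d.insert (pvBinKey (i * step) ((i + 1) * step)) (0:Int)) PySem.Dict.empty).items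
      = (PySem.List.pyRange 0 (-PySem.Int.floordiv (-maxv) step)).map
          (fun i => (pvBinKey (i * step) ((i + 1) * step), (0:Int))) := by
    have := PySem.Dict.items_foldl_insert_fresh (PySem.List.pyRange 0 (-PySem.Int.floordiv (-maxv) step))
      (fun i => pvBinKey (i * step) ((i + 1) * step)) (fun _ => (0:Int)) PySem.Dict.empty
      (fun a _ => rfl) hknd
    simpa using this
  -- A's second pass overwrites the zeros in place
  have hA := pvItems_foldl_insert_existing
    (fun i => pvBinKey (i * step) ((i + 1) * step))
    (fun i => ((diffs.filter (fun x => decide (i * step ≤ x) && decide (x < (i + 1) * step))).length : Int))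
    (PySem.List.pyRange 0 (-PySem.Int.floordiv (-maxv) step)) [] (fun _ => (0:Int)) _
    (by simpa using hzero) (by simpa using hknd)
  -- B's output comprehension over fresh distinct keys
  refine hA.trans (Eq.trans ?_ (PySem.Dict.items_foldl_insert_fresh _ _ _ _ (fun a _ => rfl) hknd).symm)
  refine Eq.trans (List.nil_append _) (Eq.trans ?_ (List.nil_append _).symm)
  apply List.map_congr_left
  intro i hi
  obtain ⟨hi0, hiN⟩ := PySem.List.mem_pyRange_one.mp hi
  refine congrArg _ ?_
  -- B's counter value at bin i is the number of nonnegative diffs whose floor-div index is i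
  rw [PySem.Dict.getD_foldl_insert_add_one, PySem.Dict.getD_empty, zero_add,
      List.count_eq_countP, List.countP_map, List.countP_filter]
  beta_reduce
  rw [Nat.cast_inj, ← List.countP_eq_length_filter]
  apply List.countP_congr
  intro x hx
  have hiff := pvBinPred step maxv x i hs (PySem.List.max?_isMax hm x hx) hi0 hiN
  simp only [Bool.and_eq_true, decide_eq_true_eq] at hiff
  rw [Bool.eq_iff_iff]
  simp only [Function.comp, Bool.and_eq_true, beq_iff_eq, decide_eq_true_eq]
  tauto
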